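-- pv_equiv track=rewrite | github.com/ece-jacob-scott/advent-of-code | year-2022/day-6/main.py | process_packet
-- ===== SOURCE A (Python) =====
-- def process_packet(packet: str, characters: int) -> int:
--     answer = characters
--     processed_characters = []
--     current_window = dict()
--
--     # preprocess
--     for character in packet[:characters]:
--         if not character in current_window:
--             current_window[character] = 0
--
--         current_window[character] += 1
--         processed_characters.append(character)
--
--     for character in packet[characters:]:
--         if len(current_window.keys()) == characters:
--             return answer
--
--         # delete the character in that left the window
--         out_of_window = processed_characters.pop(0)
--         current_window[out_of_window] -= 1
--
--         if current_window[out_of_window] == 0: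
--             del current_window[out_of_window]
--
--         # add the current character to the window
--         if not character in current_window:
--             current_window[character] = 0
--
--         current_window[character] += 1
--
--         processed_characters.append(character)
--
--         answer += 1
--
--     return answer
-- ===== SOURCE B (Python) =====
-- def process_packet(packet: str, characters: int) -> int:
--     answer = characters
--     for i in range(len(packet[characters:])):
--         if len(set(packet[i:i + characters])) == characters:
--             return answer
--         answer += 1
--     return answer
-- ===== Notes on version B (the rewrite author's own statement) =====
-- stated objective: simpler
-- what changed: B drops A's incrementally-maintained count-dict and FIFO list entirely and instead recomputes each window's distinct-character count from scratch with len(set(packet[i:i+characters])) inside a single index loop.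
import Mathlib
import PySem

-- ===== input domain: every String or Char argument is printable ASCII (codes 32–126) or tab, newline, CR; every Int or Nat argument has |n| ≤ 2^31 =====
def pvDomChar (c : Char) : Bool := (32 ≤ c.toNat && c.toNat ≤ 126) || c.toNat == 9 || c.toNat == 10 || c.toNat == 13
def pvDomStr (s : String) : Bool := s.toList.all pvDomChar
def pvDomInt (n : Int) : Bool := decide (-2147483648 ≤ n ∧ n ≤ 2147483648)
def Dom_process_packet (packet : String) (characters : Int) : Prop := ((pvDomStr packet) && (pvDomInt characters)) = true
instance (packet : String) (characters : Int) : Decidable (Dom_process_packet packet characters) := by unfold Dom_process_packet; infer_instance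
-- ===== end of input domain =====

-- B replaces A's incrementally maintained count-dict + FIFO list by recomputing each
-- window's distinct-character count from scratch (len(set(slice))) in one index loop:
-- simpler, not faster.

-- ===== PORT A =====
-- 'if not character in current_window: current_window[character] = 0; current_window[character] += 1'
def pvAddChar (w : PySem.Dict Char Int) (ch : Char) : PySem.Dict Char Int :=
  let w1 := if w.contains ch then w else w.insert ch 0
  w1.modify ch 0 (· + 1)

-- the preprocess loop: accumulates (processed_characters, current_window)
def pvPreprocess (cs : List Char) : List Char × PySem.Dict Char Int :=
  cs.foldl (fun st ch => (st.1 ++ [ch], pvAddChar st.2 ch)) ([], PySem.Dict.empty)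

-- the main loop of A (early return via recursion)
def pvALoop (characters : Int) : List Char → List Char → PySem.Dict Char Int → Int → Int
  | [], _, _, answer => answer
  | ch :: rest, processed, window, answer =>
    if (window.keys.length : Int) = characters then answer
    else
      match PySem.List.pop? processed 0 with
      | none => answer  -- Python raises IndexError here; such inputs are excluded by Pre_
      | some (out, processed') =>
        let w1 := window.modify out 0 (· - 1)
        let w2 := if w1.get? out = some 0 then w1.erase out else w1
        pvALoop characters rest (processed' ++ [ch]) (pvAddChar w2 ch) (answer + 1)

def process_packet (packet : String) (characters : Int) : Int :=
  let st := pvPreprocess (PySem.List.slice packet.toList none (some characters))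
  pvALoop characters (PySem.List.slice packet.toList (some characters) none) st.1 st.2 characters

-- ===== PORT B =====
-- 'for i in range(len(packet[characters:])): if len(set(packet[i:i+characters])) == characters: return answer; answer += 1'
def pvBLoop (L : List Char) (characters : Int) : List Nat → Int → Int
  | [], answer => answer
  | i :: rest, answer =>
    if ((PySem.Set.ofList (PySem.List.slice L (some (i : Int)) (some ((i : Int) + characters)))).length : Int) = characters
    then answer
    else pvBLoop L characters rest (answer + 1)

def process_packet_alt (packet : String) (characters : Int) : Int :=
  pvBLoop packet.toList characters
    (List.range (PySem.List.slice packet.toList (some characters) none).length) characters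

-- ===== PRECONDITION & SPEC =====
-- Pre_ excludes exactly the inputs on which A raises IndexError (pop from an empty list):
-- a nonempty packet no longer than -characters (only possible for negative characters).
def Pre_process_packet (packet : String) (characters : Int) : Prop :=
  packet.toList.length = 0 ∨ 1 ≤ (packet.toList.length : Int) + characters
instance (packet : String) (characters : Int) : Decidable (Pre_process_packet packet characters) := by
  unfold Pre_process_packet; infer_instance

def pvWitness_process_packet : String × Int := ("abcdabc", 4)

def Spec_process_packet (packet : String) (characters : Int) (out : Int) : Prop := out = process_packet_alt packet characters
instance (packet : String) (characters : Int) (out : Int) : Decidable (Spec_process_packet packet characters out) := by unfold Spec_process_packet; infer_instance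

-- ===== CLAIM (what is proved, stated in full; the proofs are below) =====
def Claim_equal_process_packet : Prop := ∀ (packet : String) (characters : Int), Dom_process_packet packet characters → Pre_process_packet packet characters → Spec_process_packet packet characters (process_packet packet characters)

-- ===== LEMMAS AND PROOFS =====

-- the invariant tying A's count-dict to the current window list
def WInv (p : List Char) (w : PySem.Dict Char Int) : Prop :=
  w.keys.Nodup ∧ ∀ ch : Char, w.get? ch = if p.count ch = 0 then none else some (p.count ch : Int)

theorem pv_get?_erase_self {κ ν : Type} [BEq κ] [LawfulBEq κ] (d : PySem.Dict κ ν) (k : κ) :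
    (d.erase k).get? k = none := by
  simp only [PySem.Dict.erase, PySem.Dict.get?]
  rw [List.find?_eq_none.2]
  · rfl
  · intro p hp
    simp [List.mem_filter] at hp
    simp [hp.2]

theorem pv_get?_erase_of_ne {κ ν : Type} [BEq κ] [LawfulBEq κ] (d : PySem.Dict κ ν) (k k' : κ)
    (h : k' ≠ k) : (d.erase k).get? k' = d.get? k' := by
  simp only [PySem.Dict.erase, PySem.Dict.get?]
  congr 1
  induction d.items with
  | nil => rfl
  | cons p ps ih =>
    by_cases hpk : p.1 = k
    · subst hpk
      simp [Ne.symm h, ih]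
    · by_cases hpk' : p.1 = k'
      · subst hpk'; simp [hpk, List.find?]
      · have : (p.1 == k') = false := by simp [hpk']
        simp [hpk, List.find?, this, ih]

theorem pv_nodup_keys_erase {κ ν : Type} [BEq κ] (d : PySem.Dict κ ν) (k : κ)
    (h : d.keys.Nodup) : (d.erase k).keys.Nodup := by
  have hsub : (d.erase k).keys.Sublist d.keys := by
    exact List.Sublist.map _ List.filter_sublist
  exact h.sublist hsub

theorem pv_winv_add (p : List Char) (w : PySem.Dict Char Int) (ch : Char) (h : WInv p w) :
    WInv (p ++ [ch]) (pvAddChar w ch) := by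
  obtain ⟨hnd, hget⟩ := h
  unfold pvAddChar
  set w1 := if w.contains ch then w else w.insert ch 0 with hw1
  have hnd1 : w1.keys.Nodup := by
    rw [hw1]; split_ifs
    · exact hnd
    · exact PySem.Dict.nodup_keys_insert w ch 0 hnd
  have hget1 : ∀ x, x ≠ ch → w1.get? x = w.get? x := by
    intro x hx
    rw [hw1]; split_ifs
    · rfl
    · exact PySem.Dict.get?_insert_of_ne w 0 hx
  have hgetc : w1.getD ch 0 = (p.count ch : Int) := by
    rw [hw1]; split_ifs with hc
    · rw [PySem.Dict.contains_eq_isSome_get?, hget ch] at hc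
      by_cases h0 : p.count ch = 0
      · simp [h0] at hc
      · simp [PySem.Dict.getD, hget ch, h0]
    · rw [PySem.Dict.contains_eq_isSome_get?, hget ch] at hc
      by_cases h0 : p.count ch = 0
      · simp [PySem.Dict.getD_insert_self, h0]
      · simp [h0] at hc
  constructor
  · simp only [PySem.Dict.modify]
    exact PySem.Dict.nodup_keys_insert _ _ _ hnd1
  · intro x
    simp only [PySem.Dict.modify]
    by_cases hx : x = ch
    · subst hx
      rw [PySem.Dict.get?_insert_self, hgetc]
      have : (p ++ [x]).count x = p.count x + 1 := by simp
      simp [this]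
    · rw [PySem.Dict.get?_insert_of_ne _ _ hx, hget1 x hx, hget x]
      have hx' : ¬ ch = x := fun hh => hx hh.symm
      have : (p ++ [ch]).count x = p.count x := by
        simp [List.count_append, hx']
      rw [this]

theorem pv_winv_pop (out : Char) (p : List Char) (w : PySem.Dict Char Int)
    (h : WInv (out :: p) w) :
    WInv p (let w1 := w.modify out 0 (· - 1);
            if w1.get? out = some 0 then w1.erase out else w1) := by
  obtain ⟨hnd, hget⟩ := h
  have hcnt : (out :: p).count out = p.count out + 1 := by simp
  have hgetD : w.getD out 0 = ((p.count out : Int) + 1) := by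
    simp [PySem.Dict.getD, hget out, hcnt]
  simp only [PySem.Dict.modify, hgetD]
  have hself : (w.insert out ((p.count out : Int) + 1 - 1)).get? out = some (p.count out : Int) := by
    rw [PySem.Dict.get?_insert_self]; norm_num
  have hnd1 := PySem.Dict.nodup_keys_insert w out ((p.count out : Int) + 1 - 1) hnd
  by_cases h0 : p.count out = 0
  · rw [if_pos (by rw [hself, h0]; norm_num)]
    constructor
    · exact pv_nodup_keys_erase _ _ hnd1
    · intro x
      by_cases hx : x = out
      · subst hx; rw [pv_get?_erase_self]; simp [h0]
      · rw [pv_get?_erase_of_ne _ _ _ hx, PySem.Dict.get?_insert_of_ne _ _ hx, hget x]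
        have hx' : ¬ out = x := fun hh => hx hh.symm
        have : (out :: p).count x = p.count x := by simp [hx']
        rw [this]
  · rw [if_neg (by rw [hself]; simp; omega)]
    constructor
    · exact hnd1
    · intro x
      by_cases hx : x = out
      · subst hx; rw [hself]; simp [h0]
      · rw [PySem.Dict.get?_insert_of_ne _ _ hx, hget x]
        have hx' : ¬ out = x := fun hh => hx hh.symm
        have : (out :: p).count x = p.count x := by simp [hx']
        rw [this]

theorem pv_winv_keys_length (p : List Char) (w : PySem.Dict Char Int) (h : WInv p w) :
    w.keys.length = (PySem.Set.ofList p).length := by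
  obtain ⟨hnd, hget⟩ := h
  have hmem : ∀ x, x ∈ w.keys ↔ x ∈ PySem.Set.ofList p := by
    intro x
    rw [PySem.Set.mem_ofList]
    constructor
    · intro hx
      by_contra hxp
      have : p.count x = 0 := List.count_eq_zero.2 hxp
      have := hget x
      rw [if_pos ‹p.count x = 0›] at this
      exact (PySem.Dict.get?_eq_none_iff_not_mem_keys w x).1 this hx
    · intro hx
      by_contra hk
      have h1 := (PySem.Dict.get?_eq_none_iff_not_mem_keys w x).2 hk
      rw [hget x] at h1
      have : p.count x ≠ 0 := by simp [List.count_eq_zero]; exact hx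
      simp [this] at h1
  exact ((List.perm_ext_iff_of_nodup hnd (PySem.Set.nodup_ofList p)).2 hmem).length_eq

theorem pv_preprocess_aux (cs : List Char) :
    ∀ (p : List Char) (w : PySem.Dict Char Int), WInv p w →
      (cs.foldl (fun st ch => (st.1 ++ [ch], pvAddChar st.2 ch)) (p, w)).1 = p ++ cs ∧
      WInv (p ++ cs) (cs.foldl (fun st ch => (st.1 ++ [ch], pvAddChar st.2 ch)) (p, w)).2 := by
  induction cs with
  | nil => intro p w h; simpa using h
  | cons ch cs ih =>
    intro p w h
    have := ih (p ++ [ch]) (pvAddChar w ch) (pv_winv_add p w ch h)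
    simpa [List.append_assoc] using this

theorem pv_winv_empty : WInv [] PySem.Dict.empty := by
  constructor
  · simp [PySem.Dict.keys, PySem.Dict.empty]
  · intro ch; simp [PySem.Dict.get?, PySem.Dict.empty]

theorem pv_preprocess_eq (cs : List Char) :
    (pvPreprocess cs).1 = cs ∧ WInv cs (pvPreprocess cs).2 := by
  have := pv_preprocess_aux cs [] PySem.Dict.empty pv_winv_empty
  simpa [pvPreprocess] using this

theorem pv_aloop_neg (c : Int) (hc : c < 0) :
    ∀ (cs p : List Char) (w : PySem.Dict Char Int) (a : Int), p ≠ [] →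
      pvALoop c cs p w a = a + cs.length := by
  intro cs
  induction cs with
  | nil => intro p w a _; simp [pvALoop]
  | cons ch rest ih =>
    intro p w a hp
    match p, hp with
    | q :: t, _ =>
      rw [pvALoop, if_neg (by intro h; omega), PySem.List.pop?_zero_cons]
      simp only []
      rw [ih (t ++ [ch]) _ (a + 1) (by simp)]
      simp only [List.length_cons]; push_cast; omega

theorem pv_bloop_neg (L : List Char) (c : Int) (hc : c < 0) :
    ∀ (idxs : List Nat) (a : Int), pvBLoop L c idxs a = a + idxs.length := by
  intro idxs
  induction idxs with
  | nil => intro a; simp [pvBLoop]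
  | cons i rest ih =>
    intro a
    rw [pvBLoop, if_neg (by intro h; omega), ih (a + 1)]
    simp only [List.length_cons]; push_cast; omega

theorem pv_loop_eq (L : List Char) (k : Nat) :
    ∀ (m j : Nat) (w : PySem.Dict Char Int) (a : Int), k + j + m = L.length →
      WInv ((L.drop j).take k) w →
      pvALoop (k : Int) (L.drop (k + j)) ((L.drop j).take k) w a =
        pvBLoop L (k : Int) (List.range' j m) a := by
  intro m
  induction m with
  | zero =>
    intro j w a hlen _
    rw [List.drop_eq_nil_of_le (by omega)]
    simp [pvALoop, pvBLoop, List.range']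
  | succ m ih =>
    intro j w a hlen hinv
    have hjk : k + j < L.length := by omega
    have hkeys := pv_winv_keys_length _ _ hinv
    have hslice : PySem.List.slice L (some (j : Int)) (some ((j : Int) + (k : Int))) = (L.drop j).take k :=
      PySem.List.slice_natCast_add L j k
    rw [List.range'_succ, pvBLoop, hslice, ← hkeys]
    rw [List.drop_eq_getElem_cons hjk, pvALoop]
    by_cases hcond : ((w.keys.length : Int) = (k : Int))
    · rw [if_pos hcond, if_pos hcond]
    · rw [if_neg hcond, if_neg hcond]
      have hk1 : 1 ≤ k := by
        rcases Nat.eq_zero_or_pos k with h0 | h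
        · exfalso; apply hcond; rw [hkeys]; subst h0; simp
        · exact h
      obtain ⟨k', rfl⟩ : ∃ k', k = k' + 1 := ⟨k - 1, by omega⟩
      have hjlt : j < L.length := by omega
      have hdropj : L.drop j = L[j] :: L.drop (j + 1) := List.drop_eq_getElem_cons hjlt
      rw [hdropj, List.take_succ_cons, PySem.List.pop?_zero_cons]
      simp only []
      have hklt : k' < (L.drop (j + 1)).length := by
        rw [List.length_drop]; omega
      have hcat : (L.drop (j + 1)).take k' ++ [L[k' + 1 + j]] = (L.drop (j + 1)).take (k' + 1) := by
        have hto := List.take_concat_get hklt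
        rw [List.concat_eq_append] at hto
        rw [← hto, List.getElem_drop]
        simp only [show j + 1 + k' = k' + 1 + j from by omega]
      rw [hcat]
      have hpop := pv_winv_pop L[j] ((L.drop (j + 1)).take k') w
        (by rw [← List.take_succ_cons, ← hdropj]; exact hinv)
      have hadd := pv_winv_add _ _ L[k' + 1 + j] hpop
      rw [hcat] at hadd
      have := ih (j + 1) _ (a + 1) (by omega) hadd
      rw [show k' + 1 + j + 1 = k' + 1 + (j + 1) from by omega]
      exact this

-- ===== VERDICT (by name: the statement is the Claim_ definition above) =====
theorem pv_slice_nil (a b : Option Int) : PySem.List.slice ([] : List Char) a b = [] := by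
  rcases h : PySem.List.slice ([] : List Char) a b with _ | ⟨x, xs⟩
  · rfl
  · exfalso
    have : x ∈ PySem.List.slice ([] : List Char) a b := by rw [h]; exact List.mem_cons_self
    exact absurd (PySem.List.mem_of_mem_slice _ _ _ this) (List.not_mem_nil)

theorem process_packet_spec : Claim_equal_process_packet := by
  unfold Claim_equal_process_packet
  intro packet c _ hpre
  unfold Spec_process_packet process_packet process_packet_alt
  rcases (by omega : 0 ≤ c ∨ c < 0) with hc | hc
  · -- c ≥ 0
    have hcast : ((c.toNat : Nat) : Int) = c := Int.toNat_of_nonneg hc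
    rw [PySem.List.slice_to packet.toList hc, PySem.List.slice_from packet.toList hc]
    obtain ⟨hp1, hp2⟩ := pv_preprocess_eq (packet.toList.take c.toNat)
    simp only [hp1]
    rcases (by omega : c.toNat ≤ packet.toList.length ∨ packet.toList.length < c.toNat) with hkn | hkn
    · have := pv_loop_eq packet.toList c.toNat (packet.toList.length - c.toNat) 0
        (pvPreprocess (packet.toList.take c.toNat)).2 c (by omega)
        (by simpa using hp2)
      simp only [List.drop_zero] at this
      rw [show c.toNat + 0 = c.toNat from by omega, hcast] at this
      rw [this, List.length_drop, List.range_eq_range']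
    · rw [List.drop_eq_nil_of_le (by omega)]
      simp [pvALoop, pvBLoop]
  · -- c < 0
    rcases hpre with hn0 | hn1
    · have hnil : packet.toList = [] := List.length_eq_zero_iff.1 hn0
      rw [hnil, pv_slice_nil, pv_slice_nil]
      simp [pvALoop, pvBLoop]
    · set n := packet.toList.length with hn
      obtain ⟨kk, hkk⟩ : ∃ kk : Nat, c = -(kk : Int) ∧ 0 < kk := by
        refine ⟨(-c).toNat, ?_, ?_⟩
        · omega
        · omega
      obtain ⟨hkc, hkpos⟩ := hkk
      rw [hkc, PySem.List.slice_to_neg_natCast packet.toList kk hkpos,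
          PySem.List.slice_from_neg_natCast packet.toList kk hkpos]
      obtain ⟨hp1, hp2⟩ := pv_preprocess_eq (packet.toList.take (packet.toList.length - kk))
      simp only [hp1]
      have hpre_ne : packet.toList.take (packet.toList.length - kk) ≠ [] := by
        intro hh
        have := congrArg List.length hh
        simp only [List.length_take, List.length_nil] at this
        omega
      rw [pv_aloop_neg _ (by omega) _ _ _ _ hpre_ne, pv_bloop_neg _ _ (by omega)]
      rw [List.length_range]
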